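-- pv_equiv track=rewrite | github.com/GundalaNikhil/DSA | dsa-problems/Heaps/testcases/tc_generators/generate_hep004.py | solve
-- ===== SOURCE A (Python) =====
-- def solve(n, strengths, priority):
--     total_strength = sum(strengths)
--
--     has_1 = False
--     has_2 = False
--     has_3 = False
--
--     count = 0
--     for p in priority:
--         if p == 1: has_1 = True
--         elif p == 2: has_2 = True
--         elif p == 3: has_3 = True
--         count += 1
--
--     if count <= 1:
--         return total_strength
--
--     penalty = 0
--
--     # We essentially coalesce all same classes for free.
--     # Then we merge the Super Ropes.
--
--     present = []
--     if has_1: present.append(1)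
--     if has_2: present.append(2)
--     if has_3: present.append(3)
--
--     if len(present) == 1:
--         penalty = 0
--     elif len(present) == 2:
--         if 1 in present and 2 in present:
--             penalty = 1
--         elif 2 in present and 3 in present:
--             penalty = 1
--         elif 1 in present and 3 in present:
--             penalty = 2
--     elif len(present) == 3:
--         # Merge 2 and 3 -> 2 (cost 1). Then 1 and 2 -> 1 (cost 1). Total 2.
--         penalty = 2
--
--     return total_strength - penalty
-- ===== SOURCE B (Python) =====
-- def solve(n, strengths, priority):
--     # Penalty equals the number of thresholds k in {1, 2} that separate some
--     # present priority class <= k from some present class > k (within 1..3):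
--     # this counts exactly max-min of the present classes, i.e. A's case table.
--     penalty = sum(
--         1
--         for k in (1, 2)
--         if any(1 <= p <= k for p in priority) and any(k < p <= 3 for p in priority)
--     )
--     return sum(strengths) - penalty
-- ===== Notes on version B (the rewrite author's own statement) =====
-- stated objective: simpler
-- what changed: B drops A's boolean flags, counting loop and exhaustive case table; it counts, via staged any()-scans, how many of the two thresholds between priority classes 1|2 and 2|3 separate present classes, which is the penalty.
import Mathlib
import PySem

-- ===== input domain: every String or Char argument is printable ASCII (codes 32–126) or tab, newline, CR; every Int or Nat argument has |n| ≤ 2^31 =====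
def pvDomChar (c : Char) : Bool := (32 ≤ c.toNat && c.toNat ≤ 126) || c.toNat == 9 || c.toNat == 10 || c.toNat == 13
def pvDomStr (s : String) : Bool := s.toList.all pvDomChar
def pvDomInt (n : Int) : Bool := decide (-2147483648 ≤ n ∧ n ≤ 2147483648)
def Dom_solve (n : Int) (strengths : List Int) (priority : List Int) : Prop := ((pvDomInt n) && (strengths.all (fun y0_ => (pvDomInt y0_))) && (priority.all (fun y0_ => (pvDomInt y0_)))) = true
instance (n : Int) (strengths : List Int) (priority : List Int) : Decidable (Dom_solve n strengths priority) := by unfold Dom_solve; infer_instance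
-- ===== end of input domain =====

-- B replaces A's boolean flags, counting loop and case table by counting, with staged
-- any()-scans, the thresholds k ∈ {1,2} that separate present priority classes (objective: simpler).

-- ===== PORT A =====
-- one step of A's for-loop over priority: updates (has_1, has_2, has_3, count)
def solveStep (s : Bool × Bool × Bool × Int) (p : Int) : Bool × Bool × Bool × Int :=
  let (h1, h2, h3, c) := s
  if p = 1 then (true, h2, h3, c + 1)
  else if p = 2 then (h1, true, h3, c + 1)
  else if p = 3 then (h1, h2, true, c + 1)
  else (h1, h2, h3, c + 1)

def solve (n : Int) (strengths : List Int) (priority : List Int) : Int :=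
  let total_strength := strengths.foldl (· + ·) 0
  let st := priority.foldl solveStep (false, false, false, 0)
  let has_1 := st.1
  let has_2 := st.2.1
  let has_3 := st.2.2.1
  let count := st.2.2.2
  if count ≤ 1 then total_strength
  else
    let present : List Int :=
      ((if has_1 then [(1 : Int)] else []) ++ (if has_2 then [(2 : Int)] else []))
        ++ (if has_3 then [(3 : Int)] else [])
    let penalty : Int :=
      if present.length = 1 then 0
      else if present.length = 2 then
        (if (1 : Int) ∈ present ∧ (2 : Int) ∈ present then 1
         else if (2 : Int) ∈ present ∧ (3 : Int) ∈ present then 1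
         else if (1 : Int) ∈ present ∧ (3 : Int) ∈ present then 2
         else 0)
      else if present.length = 3 then 2
      else 0
    total_strength - penalty

-- ===== PORT B =====
-- Source B: penalty = sum(1 for k in (1,2) if any(1<=p<=k for p in priority) and any(k<p<=3 for p in priority))
def solve_alt (n : Int) (strengths : List Int) (priority : List Int) : Int :=
  let penalty : Int :=
    (([(1 : Int), 2].filter (fun k =>
        priority.any (fun p => decide (1 ≤ p ∧ p ≤ k)) &&
        priority.any (fun p => decide (k < p ∧ p ≤ 3)))).length : Int)
  strengths.foldl (· + ·) 0 - penalty

-- ===== PRECONDITION & SPEC =====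
def Spec_solve (n : Int) (strengths : List Int) (priority : List Int) (out : Int) : Prop := out = solve_alt n strengths priority
instance (n : Int) (strengths : List Int) (priority : List Int) (out : Int) : Decidable (Spec_solve n strengths priority out) := by unfold Spec_solve; infer_instance

-- ===== CLAIM (what is proved, stated in full; the proofs are below) =====
def Claim_equal_solve : Prop := ∀ (n : Int) (strengths : List Int) (priority : List Int), Dom_solve n strengths priority → Spec_solve n strengths priority (solve n strengths priority)

-- ===== LEMMAS AND PROOFS =====

-- A's loop computes (1 ∈ priority, 2 ∈ priority, 3 ∈ priority, length)
lemma solve_fold_state (priority : List Int) (h1 h2 h3 : Bool) (c : Int) :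
    priority.foldl solveStep (h1, h2, h3, c) =
      (h1 || decide ((1 : Int) ∈ priority), h2 || decide ((2 : Int) ∈ priority),
       h3 || decide ((3 : Int) ∈ priority), c + priority.length) := by
  induction priority generalizing h1 h2 h3 c with
  | nil => simp
  | cons p t ih =>
    simp only [List.foldl_cons, solveStep]
    split_ifs with hp1 hp2 hp3 <;>
      refine Prod.ext ?_ (Prod.ext ?_ (Prod.ext ?_ ?_)) <;>
      simp [List.mem_cons, eq_comm, *] <;> ring

-- the four any()-scans of B, characterised by membership of 1, 2, 3
lemma any_le1 (l : List Int) :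
    l.any (fun p => decide (1 ≤ p ∧ p ≤ 1)) = decide ((1 : Int) ∈ l) := by
  rw [Bool.eq_iff_iff]; simp only [List.any_eq_true, decide_eq_true_eq]
  constructor
  · rintro ⟨p, hp, h⟩
    have hpe : p = 1 := by omega
    subst hpe; exact hp
  · intro h; exact ⟨1, h, by omega⟩

lemma any_gt1 (l : List Int) :
    l.any (fun p => decide (1 < p ∧ p ≤ 3)) =
      (decide ((2 : Int) ∈ l) || decide ((3 : Int) ∈ l)) := by
  rw [Bool.eq_iff_iff]; simp only [List.any_eq_true, decide_eq_true_eq, Bool.or_eq_true]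
  constructor
  · rintro ⟨p, hp, h⟩
    have : p = 2 ∨ p = 3 := by omega
    rcases this with rfl | rfl <;> [exact Or.inl hp; exact Or.inr hp]
  · rintro (h | h) <;> [exact ⟨2, h, by omega⟩; exact ⟨3, h, by omega⟩]

lemma any_le2 (l : List Int) :
    l.any (fun p => decide (1 ≤ p ∧ p ≤ 2)) =
      (decide ((1 : Int) ∈ l) || decide ((2 : Int) ∈ l)) := by
  rw [Bool.eq_iff_iff]; simp only [List.any_eq_true, decide_eq_true_eq, Bool.or_eq_true]
  constructor
  · rintro ⟨p, hp, h⟩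
    have : p = 1 ∨ p = 2 := by omega
    rcases this with rfl | rfl <;> [exact Or.inl hp; exact Or.inr hp]
  · rintro (h | h) <;> [exact ⟨1, h, by omega⟩; exact ⟨2, h, by omega⟩]

lemma any_gt2 (l : List Int) :
    l.any (fun p => decide (2 < p ∧ p ≤ 3)) = decide ((3 : Int) ∈ l) := by
  rw [Bool.eq_iff_iff]; simp only [List.any_eq_true, decide_eq_true_eq]
  constructor
  · rintro ⟨p, hp, h⟩
    have hpe : p = 3 := by omega
    subst hpe; exact hp
  · intro h; exact ⟨3, h, by omega⟩

-- ===== VERDICT (by name: the statement is the Claim_ definition above) =====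
theorem solve_spec : Claim_equal_solve := by
  intro n strengths priority _
  show solve n strengths priority = solve_alt n strengths priority
  unfold solve solve_alt
  simp only [solve_fold_state, Bool.false_or, List.filter, any_le1, any_gt1, any_le2, any_gt2]
  by_cases hlen : (0 : Int) + priority.length ≤ 1
  · rw [if_pos hlen]
    match priority, hlen with
    | [], _ => simp
    | [p], _ =>
      have hc : p = 1 ∨ p = 2 ∨ p = 3 ∨ (p ≠ 1 ∧ p ≠ 2 ∧ p ≠ 3) := by omega
      rcases hc with rfl | rfl | rfl | ⟨hq1, hq2, hq3⟩
      · simp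
      · simp
      · simp
      · simp [Ne.symm hq1, Ne.symm hq2, Ne.symm hq3]
  · rw [if_neg hlen]
    by_cases h1 : (1 : Int) ∈ priority <;> by_cases h2 : (2 : Int) ∈ priority <;>
      by_cases h3 : (3 : Int) ∈ priority <;>
      simp [h1, h2, h3]
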